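-- pv_equiv track=rewrite | github.com/AH2857/Enigma | enigma2.py | fullPass
-- ===== SOURCE A (Python) =====
-- from string import ascii_uppercase
--
-- abcStr          = ascii_uppercase + '_'
--
-- def indexFinder(letterIF, strIF):                                   # find letter characters index in the given string (abcStr or RotorType)
--     indexIF = 0
--     while letterIF != strIF[indexIF]:                               # check if letter at index matches letter
--         indexIF += 1                                                # if not, increment index
--     return indexIF                                                  # return index when match is found
--
-- def rotorPass(letterIndexRP, rotorPosRP, rotorTypeRP, reverseRP):   # reverse: is signal passing through rotor forwards or backwards
--     if reverseRP == 1: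
--         letter = abcStr[letterIndexRP]                              # convert letter index into encoded letter character
--         letterIndexRP = indexFinder(letter, rotorTypeRP)            # set index to index of letter connected to that letter
--     else:
--         letter = rotorTypeRP[letterIndexRP]                         # convert letter index into encoded letter character
--         letterIndexRP = indexFinder(letter, abcStr)                 # set index to index of letter connected to that letter
--     return letterIndexRP
--
-- def reflectorPass(letterIndexRP, reflectorTypeRP):
--     letter = reflectorTypeRP[0][letterIndexRP]                                  # convert letter index into encoded letter character
--     letterIndexRP = indexFinder(letter, abcStr)                                 # set index to index of letter connected to that letter
--     return letterIndexRP
--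
-- def fullPass(numOfRotorsFP,LetterIndexFP,rotorPositionsFP,rotorsFP,reflectorFP):
--     # 'key'->rtr1->rtr2->rtr3->refl->rtr3*->rtr2*->rtr1*->'light'
--     f = -1
--     while f < (numOfRotorsFP-1):
--         f += 1
--         LetterIndexFP = rotorPass(LetterIndexFP,rotorPositionsFP,rotorsFP[f],0)
--     LetterIndexFP = reflectorPass(LetterIndexFP,reflectorFP)
--     while f >= 0:
--         LetterIndexFP = rotorPass(LetterIndexFP,rotorPositionsFP,rotorsFP[f],1)
--         f -= 1
--     return LetterIndexFP
-- ===== SOURCE B (Python) =====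
-- from string import ascii_uppercase
--
-- abcStr = ascii_uppercase + '_'
--
-- def fullPass(numOfRotorsFP, LetterIndexFP, rotorPositionsFP, rotorsFP, reflectorFP):
--     # recursive nesting: rotor f forward, rest of the machine, rotor f backward
--     def go(f, idx):
--         if f >= numOfRotorsFP:
--             return abcStr.index(reflectorFP[0][idx])
--         idx = abcStr.index(rotorsFP[f][idx])   # forward pass through rotor f
--         idx = go(f + 1, idx)                   # rotors f+1.. and the reflector
--         return rotorsFP[f].index(abcStr[idx])  # backward pass through rotor f
--     return go(0, LetterIndexFP)
-- ===== Notes on version B (the rewrite author's own statement) =====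
-- stated objective: alternative
-- what changed: A's two sequential while-loops (forward scan, reflector, backward scan with a leftover loop counter) are replaced by one recursive helper go(f, idx) that mirrors the palindromic nesting rotor-f-forward / rest-of-machine / rotor-f-backward, with the reflector as the base case; the hand-written indexFinder scan is replaced by str.index.
-- outside the precondition, e.g. on fullPass(1, 0, 0, ['ABCDEFGHIJKLMNOPQRSTUVWXYZ_'], ['AB']): A returns 0, B returns 0
import Mathlib
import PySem

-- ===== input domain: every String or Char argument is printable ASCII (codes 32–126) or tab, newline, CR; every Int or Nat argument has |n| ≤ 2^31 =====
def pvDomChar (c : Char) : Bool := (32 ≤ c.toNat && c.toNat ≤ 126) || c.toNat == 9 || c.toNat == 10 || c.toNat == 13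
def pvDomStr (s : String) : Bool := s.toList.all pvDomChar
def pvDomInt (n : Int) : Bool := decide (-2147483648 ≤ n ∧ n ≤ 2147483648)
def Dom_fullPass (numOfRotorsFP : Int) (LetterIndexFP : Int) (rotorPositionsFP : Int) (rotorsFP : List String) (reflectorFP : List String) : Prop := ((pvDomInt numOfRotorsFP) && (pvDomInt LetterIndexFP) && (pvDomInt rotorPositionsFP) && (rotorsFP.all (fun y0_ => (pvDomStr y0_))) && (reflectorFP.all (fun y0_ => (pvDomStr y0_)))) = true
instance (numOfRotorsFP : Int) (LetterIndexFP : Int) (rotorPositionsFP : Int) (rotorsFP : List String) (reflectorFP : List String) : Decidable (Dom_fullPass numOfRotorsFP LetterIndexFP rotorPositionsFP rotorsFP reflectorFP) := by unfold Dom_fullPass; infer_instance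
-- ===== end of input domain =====

-- B replaces A's two sequential while-loops with one recursive helper mirroring the
-- palindromic rotor-forward / reflector / rotor-backward nesting (objective: alternative decomposition).


-- ===== PORT A =====
-- abcStr = ascii_uppercase + '_'  (shared module constant)
def pvAbc : List Char := "ABCDEFGHIJKLMNOPQRSTUVWXYZ_".toList

-- indexFinder: walk an index until the letter matches (Python raises IndexError past the
-- end; that case is outside Pre_, the port returns 0 there)
def indexFinderA (letterIF : Char) (strIF : List Char) : Int :=
  match strIF with
  | [] => 0
  | h :: t => if letterIF = h then 0 else 1 + indexFinderA letterIF t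

-- rotorPass (rotorPosRP is accepted and unused, exactly as in the Python)
def rotorPassA (letterIndexRP : Int) (_rotorPosRP : Int) (rotorTypeRP : String) (reverseRP : Int) : Int :=
  if reverseRP = 1 then
    let letter := (PySem.List.pyGet? pvAbc letterIndexRP).getD ' '
    indexFinderA letter rotorTypeRP.toList
  else
    let letter := (PySem.List.pyGet? rotorTypeRP.toList letterIndexRP).getD ' '
    indexFinderA letter pvAbc

def reflectorPassA (letterIndexRP : Int) (reflectorTypeRP : List String) : Int :=
  let r0 := (PySem.List.pyGet? reflectorTypeRP 0).getD ""
  let letter := (PySem.List.pyGet? r0.toList letterIndexRP).getD ' '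
  indexFinderA letter pvAbc

def fullPass (numOfRotorsFP : Int) (LetterIndexFP : Int) (rotorPositionsFP : Int) (rotorsFP : List String) (reflectorFP : List String) : Int :=
  -- while f < n-1: f += 1; idx = rotorPass(idx, pos, rotors[f], 0)   — f runs 0,…,n-1
  let i1 := (PySem.List.pyRange 0 numOfRotorsFP 1).foldl
      (fun idx f => rotorPassA idx rotorPositionsFP ((PySem.List.pyGet? rotorsFP f).getD "") 0) LetterIndexFP
  let i2 := reflectorPassA i1 reflectorFP
  -- while f >= 0: idx = rotorPass(idx, pos, rotors[f], 1); f -= 1    — f runs n-1,…,0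
  (PySem.List.pyRange (numOfRotorsFP - 1) (-1) (-1)).foldl
      (fun idx f => rotorPassA idx rotorPositionsFP ((PySem.List.pyGet? rotorsFP f).getD "") 1) i2

-- ===== PORT B =====
-- s.index(c) (ValueError outside Pre_; the port returns 0 there)
def pvIdx (s : List Char) (c : Char) : Int := ((PySem.List.index? s c).getD 0 : Nat)

-- go(f, idx) from Source B; the fuel k encodes numOfRotors - f, so f = n - k
def goB (n : Int) (rotors : List String) (refl : List String) : Nat → Int → Int
  | 0, idx =>
      let r0 := (PySem.List.pyGet? refl 0).getD ""
      pvIdx pvAbc ((PySem.List.pyGet? r0.toList idx).getD ' ')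
  | Nat.succ k, idx =>
      let r := ((PySem.List.pyGet? rotors (n - ((k : Int) + 1))).getD "").toList
      let i1 := pvIdx pvAbc ((PySem.List.pyGet? r idx).getD ' ')
      let i2 := goB n rotors refl k i1
      pvIdx r ((PySem.List.pyGet? pvAbc i2).getD ' ')

def fullPass_alt (numOfRotorsFP : Int) (LetterIndexFP : Int) (rotorPositionsFP : Int) (rotorsFP : List String) (reflectorFP : List String) : Int :=
  goB numOfRotorsFP rotorsFP reflectorFP numOfRotorsFP.toNat LetterIndexFP

-- ===== PRECONDITION & SPEC =====
-- Pre_ excludes inputs on which A raises (indexFinder walking off the end of a string,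
-- an out-of-range letter index, too few rotors, an empty reflector); in the rotor branch
-- (numOfRotorsFP > 0) it is a sufficient shape condition (27-char alphabet-permutation
-- rotors, alphabet 27-char reflector prefix), so it also excludes some malformed rotor
-- shapes on which A happens to return because of which cells the signal visits.
def Pre_fullPass (numOfRotorsFP : Int) (LetterIndexFP : Int) (rotorPositionsFP : Int) (rotorsFP : List String) (reflectorFP : List String) : Prop :=
  if numOfRotorsFP ≤ 0 then
    -(((reflectorFP.headD "").toList.length : Int)) ≤ LetterIndexFP ∧
    LetterIndexFP < ((reflectorFP.headD "").toList.length : Int) ∧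
    ((PySem.List.pyGet? (reflectorFP.headD "").toList LetterIndexFP).getD ' ') ∈ pvAbc
  else
    -27 ≤ LetterIndexFP ∧ LetterIndexFP < 27 ∧ numOfRotorsFP ≤ (rotorsFP.length : Int) ∧
    ((rotorsFP.take numOfRotorsFP.toNat).all (fun r =>
        r.toList.length == 27 && r.toList.all pvAbc.contains && pvAbc.all r.toList.contains)) = true ∧
    reflectorFP ≠ [] ∧ 27 ≤ (reflectorFP.headD "").toList.length ∧
    (((reflectorFP.headD "").toList.take 27).all pvAbc.contains) = true
instance (numOfRotorsFP : Int) (LetterIndexFP : Int) (rotorPositionsFP : Int) (rotorsFP : List String) (reflectorFP : List String) : Decidable (Pre_fullPass numOfRotorsFP LetterIndexFP rotorPositionsFP rotorsFP reflectorFP) := by unfold Pre_fullPass; infer_instance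

def pvWitness_fullPass : Int × Int × Int × List String × List String :=
  (2, 4, 1, ["EKMFLGDQVZNTOWYHXUSPAIBRCJ_", "AJDKSIRUXBLHWTMCQGZNPYFVOE_"], ["YRUHQSLDPXNGOKMIEBFZCWVJAT_"])

def Spec_fullPass (numOfRotorsFP : Int) (LetterIndexFP : Int) (rotorPositionsFP : Int) (rotorsFP : List String) (reflectorFP : List String) (out : Int) : Prop := out = fullPass_alt numOfRotorsFP LetterIndexFP rotorPositionsFP rotorsFP reflectorFP
instance (numOfRotorsFP : Int) (LetterIndexFP : Int) (rotorPositionsFP : Int) (rotorsFP : List String) (reflectorFP : List String) (out : Int) : Decidable (Spec_fullPass numOfRotorsFP LetterIndexFP rotorPositionsFP rotorsFP reflectorFP out) := by unfold Spec_fullPass; infer_instance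

-- ===== CLAIM (what is proved, stated in full; the proofs are below) =====
def Claim_equal_fullPass : Prop := ∀ (numOfRotorsFP : Int) (LetterIndexFP : Int) (rotorPositionsFP : Int) (rotorsFP : List String) (reflectorFP : List String), Dom_fullPass numOfRotorsFP LetterIndexFP rotorPositionsFP rotorsFP reflectorFP → Pre_fullPass numOfRotorsFP LetterIndexFP rotorPositionsFP rotorsFP reflectorFP → Spec_fullPass numOfRotorsFP LetterIndexFP rotorPositionsFP rotorsFP reflectorFP (fullPass numOfRotorsFP LetterIndexFP rotorPositionsFP rotorsFP reflectorFP)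

-- ===== LEMMAS AND PROOFS =====

theorem pvWitness_ok : Dom_fullPass pvWitness_fullPass.1 pvWitness_fullPass.2.1 pvWitness_fullPass.2.2.1 pvWitness_fullPass.2.2.2.1 pvWitness_fullPass.2.2.2.2 ∧ Pre_fullPass pvWitness_fullPass.1 pvWitness_fullPass.2.1 pvWitness_fullPass.2.2.1 pvWitness_fullPass.2.2.2.1 pvWitness_fullPass.2.2.2.2 := by decide


-- ---- proof-only helpers ----

def pvGood (i : Int) : Prop := 0 ≤ i ∧ i < 27

def pvRot (r : String) : Prop :=
  r.toList.length = 27 ∧ (∀ c ∈ r.toList, c ∈ pvAbc) ∧ (∀ c ∈ pvAbc, c ∈ r.toList)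

def pvReflOK (refl : List String) : Prop :=
  refl ≠ [] ∧ 27 ≤ (refl.headD "").toList.length ∧
  (∀ c ∈ (refl.headD "").toList.take 27, c ∈ pvAbc)

-- B's nested shape, abstracted over the used-rotor list
def pvNest (refl : List String) : List String → Int → Int
  | [], i =>
      pvIdx pvAbc ((PySem.List.pyGet? ((PySem.List.pyGet? refl 0).getD "").toList i).getD ' ')
  | r :: t, i =>
      pvIdx r.toList ((PySem.List.pyGet? pvAbc (pvNest refl t (pvIdx pvAbc ((PySem.List.pyGet? r.toList i).getD ' ')))).getD ' ')

theorem pvAbc_length : pvAbc.length = 27 := rfl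

theorem idxf_eq (c : Char) (s : List Char) (h : c ∈ s) : indexFinderA c s = pvIdx s c := by
  induction s with
  | nil => cases h
  | cons x t ih =>
    unfold pvIdx
    by_cases hx : c = x
    · subst hx
      rw [PySem.List.index?_cons_self]
      simp [indexFinderA]
    · have h' : c ∈ t := by
        rcases List.mem_cons.mp h with h' | h'
        · exact absurd h' hx
        · exact h'
      rw [PySem.List.index?_cons_of_ne t (fun e => hx e.symm)]
      rcases Option.isSome_iff_exists.mp ((PySem.List.index?_isSome_iff t c).mpr h') with ⟨k, hk⟩
      have ihe := ih h'
      unfold pvIdx at ihe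
      rw [hk] at ihe
      rw [hk]
      simp only [indexFinderA, if_neg hx, ihe, Option.map_some, Option.getD_some]
      omega

theorem idxf_lt (c : Char) (s : List Char) (h : c ∈ s) : pvIdx s c < (s.length : Int) := by
  rcases Option.isSome_iff_exists.mp ((PySem.List.index?_isSome_iff s c).mpr h) with ⟨k, hk⟩
  rcases PySem.List.getElem_of_index?_eq_some hk with ⟨hlt, -, -⟩
  unfold pvIdx
  rw [hk]
  simp only [Option.getD_some]
  exact_mod_cast hlt

theorem pvIdx_nonneg (s : List Char) (c : Char) : 0 ≤ pvIdx s c := by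
  simp [pvIdx]

theorem pyGet_mem_range (s : List Char) (i : Int)
    (h : -(s.length : Int) ≤ i ∧ i < s.length) : (PySem.List.pyGet? s i).getD ' ' ∈ s := by
  cases hg : PySem.List.pyGet? s i with
  | none =>
    rw [PySem.List.pyGet?_eq_none_iff] at hg
    exact absurd (by constructor <;> omega : PySem.Raise.InRange s.length i) hg
  | some c =>
    simpa using PySem.List.mem_of_pyGet?_eq_some s hg

theorem pyGet_mem_take (s : List Char) (i : Int) (hi : pvGood i) (hlen : 27 ≤ s.length) :
    (PySem.List.pyGet? s i).getD ' ' ∈ s.take 27 := by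
  obtain ⟨h0, h27⟩ := hi
  have hlt : i.toNat < s.length := by omega
  rw [PySem.List.pyGet?_eq_some_getElem s h0 (by omega)]
  simp only [Option.getD_some]
  have htk : i.toNat < (s.take 27).length := by simp; omega
  have hg : (s.take 27)[i.toNat] = s[i.toNat] := List.getElem_take
  rw [← hg]
  exact List.getElem_mem htk

-- the base reflector step: A-form equals B-form and the result is good
theorem refl_step (refl : List String) (i : Int)
    (hin : -(((refl.headD "").toList.length : Int)) ≤ i ∧ i < (refl.headD "").toList.length)
    (habc : (PySem.List.pyGet? (refl.headD "").toList i).getD ' ' ∈ pvAbc) :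
    reflectorPassA i refl =
      pvIdx pvAbc ((PySem.List.pyGet? ((PySem.List.pyGet? refl 0).getD "").toList i).getD ' ')
    ∧ pvGood (pvIdx pvAbc ((PySem.List.pyGet? ((PySem.List.pyGet? refl 0).getD "").toList i).getD ' ')) := by
  have h0 : (PySem.List.pyGet? refl 0).getD "" = refl.headD "" := by
    cases refl with
    | nil => rfl
    | cons a t => simp
  rw [h0]
  refine ⟨?_, pvIdx_nonneg _ _, ?_⟩
  · unfold reflectorPassA
    rw [h0]
    exact idxf_eq _ _ habc
  · have h := idxf_lt _ _ habc
    rw [pvAbc_length] at h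
    exact_mod_cast h

-- forward step through one rotor: A-form = B-form, goodness preserved
theorem fwd_step (r : String) (i : Int) (hr : pvRot r) (hi : -27 ≤ i ∧ i < 27) :
    rotorPassA i 0 r 0 = pvIdx pvAbc ((PySem.List.pyGet? r.toList i).getD ' ')
    ∧ pvGood (pvIdx pvAbc ((PySem.List.pyGet? r.toList i).getD ' ')) := by
  obtain ⟨hlen, hsub, -⟩ := hr
  have hm := pyGet_mem_range r.toList i (by omega)
  have habc : (PySem.List.pyGet? r.toList i).getD ' ' ∈ pvAbc := hsub _ hm
  refine ⟨?_, pvIdx_nonneg _ _, ?_⟩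
  · simp only [rotorPassA, if_neg (by norm_num : ¬ (0:Int) = 1)]
    exact idxf_eq _ _ habc
  · have h := idxf_lt _ _ habc
    rw [pvAbc_length] at h
    exact_mod_cast h

-- backward step through one rotor: A-form = B-form, goodness preserved
theorem bwd_step (r : String) (i : Int) (hr : pvRot r) (hi : pvGood i) :
    rotorPassA i 0 r 1 = pvIdx r.toList ((PySem.List.pyGet? pvAbc i).getD ' ')
    ∧ pvGood (pvIdx r.toList ((PySem.List.pyGet? pvAbc i).getD ' ')) := by
  obtain ⟨hlen, -, hsup⟩ := hr
  obtain ⟨hi0, hi27⟩ := hi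
  have hm := pyGet_mem_range pvAbc i (by rw [pvAbc_length]; omega)
  have hmr : (PySem.List.pyGet? pvAbc i).getD ' ' ∈ r.toList := hsup _ hm
  refine ⟨?_, pvIdx_nonneg _ _, ?_⟩
  · simp only [rotorPassA]
    exact idxf_eq _ _ hmr
  · have h := idxf_lt _ _ hmr
    omega

-- what the entry index must satisfy: for the reflector alone, in-range and a decodable
-- cell; with at least one rotor, the rotor-indexing range plus a well-shaped reflector
def pvInit (refl : List String) : List String → Int → Prop
  | [], i =>
      (-(((refl.headD "").toList.length : Int)) ≤ i ∧ i < (refl.headD "").toList.length) ∧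
      (PySem.List.pyGet? (refl.headD "").toList i).getD ' ' ∈ pvAbc
  | _ :: _, i => (-27 ≤ i ∧ i < 27) ∧ pvReflOK refl

theorem good_init (refl : List String) (rs : List String) (i : Int)
    (hg : pvGood i) (hrefl : pvReflOK refl) : pvInit refl rs i := by
  obtain ⟨h0, h27⟩ := hg
  cases rs with
  | cons r t => exact ⟨⟨by omega, by omega⟩, hrefl⟩
  | nil =>
    obtain ⟨-, hlen, hmem⟩ := hrefl
    exact ⟨⟨by omega, by omega⟩, hmem _ (pyGet_mem_take _ _ ⟨h0, h27⟩ hlen)⟩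

-- the palindromic nesting: fold-forward, reflect, fold-backward = pvNest
theorem nest_eq (refl : List String) :
    ∀ (rs : List String) (i : Int), (∀ r ∈ rs, pvRot r) → pvInit refl rs i →
      (rs.reverse.foldl (fun idx r => rotorPassA idx 0 r 1)
        (reflectorPassA (rs.foldl (fun idx r => rotorPassA idx 0 r 0) i) refl)
        = pvNest refl rs i)
      ∧ pvGood (pvNest refl rs i) := by
  intro rs
  induction rs with
  | nil =>
    intro i _ hi
    have h := refl_step refl i hi.1 hi.2
    exact ⟨h.1, h.2⟩
  | cons r t ih =>
    intro i hall hi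
    have hr : pvRot r := hall r (List.mem_cons_self ..)
    have hf := fwd_step r i hr hi.1
    have iht := ih (pvIdx pvAbc ((PySem.List.pyGet? r.toList i).getD ' '))
      (fun x hx => hall x (List.mem_cons_of_mem _ hx))
      (good_init refl t _ hf.2 hi.2)
    have hb := bwd_step r (pvNest refl t (pvIdx pvAbc ((PySem.List.pyGet? r.toList i).getD ' '))) hr iht.2
    refine ⟨?_, hb.2⟩
    rw [List.reverse_cons, List.foldl_append]
    simp only [List.foldl_cons, List.foldl_nil]
    rw [hf.1, iht.1, hb.1]
    rfl

-- A's ranges depend only on max(n,0)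
theorem range_up_toNat (n : Int) : PySem.List.pyRange 0 n 1 = PySem.List.pyRange 0 (n.toNat : Int) 1 := by
  rcases le_or_gt n 0 with h | h
  · rw [show n.toNat = 0 by omega]
    simp [PySem.List.pyRange]
    omega
  · rw [Int.toNat_of_nonneg (by omega)]

theorem range_down_toNat (n : Int) :
    PySem.List.pyRange (n - 1) (-1) (-1) = PySem.List.pyRange ((n.toNat : Int) - 1) (-1) (-1) := by
  rcases le_or_gt n 0 with h | h
  · rw [show n.toNat = 0 by omega]
    simp [PySem.List.pyRange]
    omega
  · rw [Int.toNat_of_nonneg (by omega)]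

theorem range_down_cons (a : Int) (ha : 0 ≤ a) :
    PySem.List.pyRange a (-1) (-1) = a :: PySem.List.pyRange (a - 1) (-1) (-1) := by
  rcases eq_or_lt_of_le ha with h0 | hpos
  · rw [← h0]; decide
  · simp only [PySem.List.pyRange]
    norm_num
    rw [if_pos (by omega : (-1:Int) < a), if_pos hpos,
        show (a + 1).toNat = a.toNat + 1 by omega,
        List.range_succ_eq_map, List.map_cons, List.map_map]
    congr 1
    · push_cast; ring
    · apply List.map_congr_left
      intro k _
      simp [Nat.succ_eq_add_one]
      omega

-- forward while-loop = fold over the used rotors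
theorem fold_up (rotors : List String) (g : Int → String → Int) :
    ∀ (k : Nat), k ≤ rotors.length → ∀ (x : Int),
      (PySem.List.pyRange 0 (k : Int) 1).foldl
          (fun idx f => g idx ((PySem.List.pyGet? rotors f).getD "")) x
        = (rotors.take k).foldl g x := by
  intro k
  induction k with
  | zero => intro _ x; simp [PySem.List.pyRange]
  | succ k ih =>
    intro hk x
    rw [show ((k + 1 : Nat) : Int) = (k : Int) + 1 by push_cast; ring,
        PySem.List.pyRange_one_succ_right (by positivity), List.foldl_append,
        List.take_add_one, List.foldl_append, ih (by omega)]
    have hg : rotors[k]? = some rotors[k] := List.getElem?_eq_getElem (by omega)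
    simp [PySem.List.pyGet?_natCast, hg]

-- backward while-loop = fold over the used rotors reversed
theorem fold_down (rotors : List String) (g : Int → String → Int) :
    ∀ (k : Nat), k ≤ rotors.length → ∀ (x : Int),
      (PySem.List.pyRange ((k : Int) - 1) (-1) (-1)).foldl
          (fun idx f => g idx ((PySem.List.pyGet? rotors f).getD "")) x
        = ((rotors.take k).reverse).foldl g x := by
  intro k
  induction k with
  | zero => intro _ x; simp [PySem.List.pyRange]
  | succ k ih =>
    intro hk x
    have h1 : ((k + 1 : Nat) : Int) - 1 = (k : Int) := by push_cast; ring
    rw [h1, range_down_cons _ (by positivity), List.foldl_cons]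
    have hg : rotors[k]? = some rotors[k] := List.getElem?_eq_getElem (by omega)
    have h2 : (PySem.List.pyGet? rotors (k : Int)).getD "" = rotors[k] := by
      simp [PySem.List.pyGet?_natCast, hg]
    rw [h2, List.take_add_one, hg]
    simp only [Option.toList_some, List.reverse_append, List.reverse_cons, List.reverse_nil,
      List.nil_append, List.singleton_append, List.foldl_cons]
    exact ih (by omega) (g x rotors[k])

-- B's fuel recursion = pvNest on the used rotors
theorem goB_eq (n : Int) (rotors refl : List String) (hn : (n.toNat : Int) ≤ rotors.length) :
    ∀ (k : Nat), k ≤ n.toNat → ∀ (i : Int),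
      goB n rotors refl k i = pvNest refl ((rotors.take n.toNat).drop (n.toNat - k)) i := by
  intro k
  induction k with
  | zero =>
    intro _ i
    have hd : (rotors.take n.toNat).drop (n.toNat - 0) = [] := by
      apply List.drop_eq_nil_of_le
      simp [List.length_take]
    rw [hd]
    rfl
  | succ k ih =>
    intro hk i
    have hidx : n - ((k : Int) + 1) = ((n.toNat - (k + 1) : Nat) : Int) := by omega
    have hlt : n.toNat - (k + 1) < rotors.length := by omega
    have hget : (PySem.List.pyGet? rotors (n - ((k : Int) + 1))).getD ""
        = rotors[n.toNat - (k + 1)] := by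
      rw [hidx]
      simp [PySem.List.pyGet?_natCast, List.getElem?_eq_getElem hlt]
    have hdrop : (rotors.take n.toNat).drop (n.toNat - (k + 1))
        = rotors[n.toNat - (k + 1)] :: (rotors.take n.toNat).drop (n.toNat - k) := by
      rw [List.drop_eq_getElem_cons (by simp [List.length_take]; omega)]
      congr 1
      · simp [List.getElem_take]
      · congr 1
        omega
    rw [hdrop]
    show (let r := ((PySem.List.pyGet? rotors (n - ((k : Int) + 1))).getD "").toList
          let i1 := pvIdx pvAbc ((PySem.List.pyGet? r i).getD ' ')
          let i2 := goB n rotors refl k i1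
          pvIdx r ((PySem.List.pyGet? pvAbc i2).getD ' ')) = _
    simp only [hget]
    rw [ih (by omega)]
    rfl

-- ===== VERDICT (by name: the statement is the Claim_ definition above) =====
theorem fullPass_spec : Claim_equal_fullPass := by
  intro n L pos rotors refl _hdom hpre
  unfold Pre_fullPass at hpre
  have hmain : ∀ (hklen : n.toNat ≤ rotors.length),
      (∀ r ∈ rotors.take n.toNat, pvRot r) → pvInit refl (rotors.take n.toNat) L →
      fullPass n L pos rotors refl = fullPass_alt n L pos rotors refl := by
    intro hklen hall hinit
    have hnlen : (n.toNat : Int) ≤ rotors.length := by exact_mod_cast hklen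
    have hnest := nest_eq refl (rotors.take n.toNat) L hall hinit
    unfold fullPass fullPass_alt
    rw [range_up_toNat, range_down_toNat,
        fold_up rotors (fun idx r => rotorPassA idx pos r 0) n.toNat hklen,
        fold_down rotors (fun idx r => rotorPassA idx pos r 1) n.toNat hklen,
        goB_eq n rotors refl hnlen n.toNat le_rfl]
    simp only [Nat.sub_self, List.drop_zero]
    have hpos0 : ∀ idx (r : String) rev, rotorPassA idx pos r rev = rotorPassA idx 0 r rev :=
      fun _ _ _ => rfl
    simp only [hpos0]
    exact hnest.1
  by_cases hn0 : n ≤ 0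
  · rw [if_pos hn0] at hpre
    obtain ⟨h1, h2, h3⟩ := hpre
    have ht0 : rotors.take n.toNat = [] := by
      rw [show n.toNat = 0 by omega, List.take_zero]
    show fullPass n L pos rotors refl = fullPass_alt n L pos rotors refl
    exact hmain (by omega) (by rw [ht0]; intro r hr; cases hr) (by rw [ht0]; exact ⟨⟨h1, h2⟩, h3⟩)
  · rw [if_neg hn0] at hpre
    obtain ⟨hL0, hL27, hn, hrot, hne, hrlen, hrmem⟩ := hpre
    have hrefl : pvReflOK refl := ⟨hne, hrlen, by
      intro c hc
      have h := (List.all_eq_true.mp hrmem) c hc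
      simpa [List.contains_iff_mem] using h⟩
    have hall : ∀ r ∈ rotors.take n.toNat, pvRot r := by
      intro r hr
      have h := (List.all_eq_true.mp hrot) r hr
      simp only [Bool.and_eq_true, beq_iff_eq] at h
      refine ⟨h.1.1, ?_, ?_⟩
      · intro c hc
        have h2 := (List.all_eq_true.mp h.1.2) c hc
        simpa [List.contains_iff_mem] using h2
      · intro c hc
        have h2 := (List.all_eq_true.mp h.2) c hc
        simpa [List.contains_iff_mem] using h2
    have hklen : n.toNat ≤ rotors.length := by omega
    have htk : rotors.take n.toNat ≠ [] := by
      have : (rotors.take n.toNat).length = n.toNat := by simp; omega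
      intro he
      rw [he] at this
      simp at this
      omega
    have hinit : pvInit refl (rotors.take n.toNat) L := by
      cases hc : rotors.take n.toNat with
      | nil => exact absurd hc htk
      | cons r t => exact ⟨⟨hL0, hL27⟩, hrefl⟩
    exact hmain hklen hall hinit
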